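-- pv_equiv track=rewrite | github.com/kostichs/battleship | Battleship_gui/tanya_ship.py | ship_points
-- ===== SOURCE A (Python) =====
-- def ship_points(row_col=(3, 3), ship_length=4, count=1, direction=(1, 0), board_size=(10, 10)):
--     while count > 0:
--         points = []
--         for i in range(ship_length):
--             points.append((row_col[0]+i*direction[0], row_col[1]+i*direction[1]))
--             if points[i][0] >= board_size[0] or points[i][1] >= board_size[1]:
--                 return None
--         count -= 1
--         return points
-- ===== SOURCE B (Python) =====
-- def ship_points(row_col=(3, 3), ship_length=4, count=1, direction=(1, 0), board_size=(10, 10)):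
--     if count <= 0:
--         return None
--     if ship_length <= 0:
--         return []
--     r0, c0 = row_col
--     dr, dc = direction
--     er = ship_length - 1 if dr >= 0 else 0
--     ec = ship_length - 1 if dc >= 0 else 0
--     if r0 + er * dr >= board_size[0] or c0 + ec * dc >= board_size[1]:
--         return None
--     return [(r0 + i * dr, c0 + i * dc) for i in range(ship_length)]
-- ===== Notes on version B (the rewrite author's own statement) =====
-- stated objective: alternative
-- what changed: A validates every point inside the building loop with an early return; B decides validity up front with a closed-form endpoint bounds test (extreme index per axis from the direction sign) and only then builds the list with a comprehension.
import Mathlib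
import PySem

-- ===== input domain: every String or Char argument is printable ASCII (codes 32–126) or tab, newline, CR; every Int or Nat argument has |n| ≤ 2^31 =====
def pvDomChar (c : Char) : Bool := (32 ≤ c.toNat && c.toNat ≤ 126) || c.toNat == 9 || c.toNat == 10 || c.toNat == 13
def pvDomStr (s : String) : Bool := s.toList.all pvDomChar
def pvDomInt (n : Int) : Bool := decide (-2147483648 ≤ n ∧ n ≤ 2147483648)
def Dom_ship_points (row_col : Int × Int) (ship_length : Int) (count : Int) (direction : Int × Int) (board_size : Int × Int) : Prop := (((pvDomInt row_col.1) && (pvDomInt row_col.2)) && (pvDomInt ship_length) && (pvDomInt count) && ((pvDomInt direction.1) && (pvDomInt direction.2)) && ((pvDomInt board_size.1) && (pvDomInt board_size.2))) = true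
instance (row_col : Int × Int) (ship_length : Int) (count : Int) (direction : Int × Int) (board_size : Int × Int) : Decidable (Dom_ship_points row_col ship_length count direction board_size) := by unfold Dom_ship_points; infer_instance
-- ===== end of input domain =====

-- B replaces A's per-point bounds check inside the building loop by a closed-form
-- endpoint bounds test (extreme index per axis from the direction sign) done before
-- building the list; objective: alternative (same O(ship_length) cost).

-- ===== PORT A =====
-- the for-loop of A: append the point, early-return None if it is out of bounds
def shipA_go (row_col : Int × Int) (direction : Int × Int) (board_size : Int × Int) :
    List Int → List (Int × Int) → Option (List (Int × Int))
  | [], points => some points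
  | i :: rest, points =>
    let p : Int × Int := (row_col.1 + i * direction.1, row_col.2 + i * direction.2)
    if p.1 ≥ board_size.1 ∨ p.2 ≥ board_size.2 then none
    else shipA_go row_col direction board_size rest (points ++ [p])

def ship_points (row_col : Int × Int) (ship_length : Int) (count : Int) (direction : Int × Int) (board_size : Int × Int) : Option (List (Int × Int)) :=
  -- 'while count > 0' always returns inside its first iteration; count <= 0 falls off → None
  if count > 0 then shipA_go row_col direction board_size (PySem.List.pyRange 0 ship_length 1) []
  else none

-- ===== PORT B =====
def ship_points_alt (row_col : Int × Int) (ship_length : Int) (count : Int) (direction : Int × Int) (board_size : Int × Int) : Option (List (Int × Int)) :=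
  if count ≤ 0 then none
  else if ship_length ≤ 0 then some []
  else
    let er : Int := if direction.1 ≥ 0 then ship_length - 1 else 0
    let ec : Int := if direction.2 ≥ 0 then ship_length - 1 else 0
    if row_col.1 + er * direction.1 ≥ board_size.1 ∨ row_col.2 + ec * direction.2 ≥ board_size.2 then none
    else some ((PySem.List.pyRange 0 ship_length 1).map
      (fun i => (row_col.1 + i * direction.1, row_col.2 + i * direction.2)))

-- ===== PRECONDITION & SPEC =====
def Spec_ship_points (row_col : Int × Int) (ship_length : Int) (count : Int) (direction : Int × Int) (board_size : Int × Int) (out : Option (List (Int × Int))) : Prop := out = ship_points_alt row_col ship_length count direction board_size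
instance (row_col : Int × Int) (ship_length : Int) (count : Int) (direction : Int × Int) (board_size : Int × Int) (out : Option (List (Int × Int))) : Decidable (Spec_ship_points row_col ship_length count direction board_size out) := by unfold Spec_ship_points; infer_instance

-- ===== CLAIM (what is proved, stated in full; the proofs are below) =====
def Claim_equal_ship_points : Prop := ∀ (row_col : Int × Int) (ship_length : Int) (count : Int) (direction : Int × Int) (board_size : Int × Int), Dom_ship_points row_col ship_length count direction board_size → Spec_ship_points row_col ship_length count direction board_size (ship_points row_col ship_length count direction board_size)

-- ===== LEMMAS AND PROOFS =====

-- A's loop returns None iff any generated point violates the bound, else the full list.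
theorem shipA_go_char (rc dir bs : Int × Int) (l : List Int) (acc : List (Int × Int)) :
    shipA_go rc dir bs l acc =
      if l.any (fun i => decide (rc.1 + i * dir.1 ≥ bs.1) || decide (rc.2 + i * dir.2 ≥ bs.2))
      then none
      else some (acc ++ l.map (fun i => (rc.1 + i * dir.1, rc.2 + i * dir.2))) := by
  induction l generalizing acc with
  | nil => simp [shipA_go]
  | cons i rest ih =>
    simp only [shipA_go, List.any_cons, List.map_cons]
    by_cases h : rc.1 + i * dir.1 ≥ bs.1 ∨ rc.2 + i * dir.2 ≥ bs.2
    · rcases h with h | h <;> simp [h]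
    · push_neg at h
      rw [if_neg (by simpa using h)]
      rw [ih]
      have h1 : ¬ (bs.1 ≤ rc.1 + i * dir.1) := by omega
      have h2 : ¬ (bs.2 ≤ rc.2 + i * dir.2) := by omega
      simp [h1, h2]

-- the endpoint test is equivalent to "some index in [0, L) violates"
theorem endpoint_iff (rc dir bs : Int × Int) (L : Int) (hL : 0 < L) :
    ((∃ i, (0 ≤ i ∧ i < L) ∧ (bs.1 ≤ rc.1 + i * dir.1 ∨ bs.2 ≤ rc.2 + i * dir.2)) ↔
      (bs.1 ≤ rc.1 + (if dir.1 ≥ 0 then L - 1 else 0) * dir.1 ∨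
       bs.2 ≤ rc.2 + (if dir.2 ≥ 0 then L - 1 else 0) * dir.2)) := by
  constructor
  · rintro ⟨i, ⟨h0, hiL⟩, hv⟩
    rcases hv with hv | hv
    · left
      by_cases hd : dir.1 ≥ 0
      · rw [if_pos hd]
        nlinarith [mul_le_mul_of_nonneg_right (show i ≤ L - 1 by omega) hd]
      · rw [if_neg hd]
        push_neg at hd
        nlinarith [mul_nonpos_of_nonneg_of_nonpos h0 (le_of_lt hd)]
    · right
      by_cases hd : dir.2 ≥ 0
      · rw [if_pos hd]
        nlinarith [mul_le_mul_of_nonneg_right (show i ≤ L - 1 by omega) hd]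
      · rw [if_neg hd]
        push_neg at hd
        nlinarith [mul_nonpos_of_nonneg_of_nonpos h0 (le_of_lt hd)]
  · rintro (hv | hv)
    · exact ⟨if dir.1 ≥ 0 then L - 1 else 0, by split_ifs <;> omega, Or.inl hv⟩
    · exact ⟨if dir.2 ≥ 0 then L - 1 else 0, by split_ifs <;> omega, Or.inr hv⟩

-- ===== VERDICT (by name: the statement is the Claim_ definition above) =====
theorem ship_points_spec : Claim_equal_ship_points := by
  intro rc L count dir bs _
  unfold Spec_ship_points ship_points ship_points_alt
  by_cases hc : count ≤ 0
  · simp [hc, show ¬ count > 0 by omega]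
  · push_neg at hc
    rw [if_pos hc, if_neg (by omega)]
    by_cases hL : L ≤ 0
    · rw [if_pos hL]
      have ht : (L - 0).toNat = 0 := by omega
      have : PySem.List.pyRange 0 L 1 = [] := by
        rw [PySem.List.pyRange_one, ht]
        simp
      simp [this, shipA_go]
    · push_neg at hL
      rw [if_neg (by omega)]
      rw [shipA_go_char]
      by_cases hv : ∃ i, (0 ≤ i ∧ i < L) ∧ (bs.1 ≤ rc.1 + i * dir.1 ∨ bs.2 ≤ rc.2 + i * dir.2)
      · have hany : (PySem.List.pyRange 0 L 1).any
            (fun i => decide (rc.1 + i * dir.1 ≥ bs.1) || decide (rc.2 + i * dir.2 ≥ bs.2)) = true := by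
          rcases hv with ⟨i, ⟨h0, hiL⟩, hviol⟩
          refine List.any_eq_true.mpr ⟨i, ?_, ?_⟩
          · exact PySem.List.mem_pyRange_one.mpr ⟨h0, hiL⟩
          · rcases hviol with h | h <;> simp [h]
        rw [if_pos hany]
        rw [if_pos ((endpoint_iff rc dir bs L hL).mp hv)]
      · have hany : ¬ (PySem.List.pyRange 0 L 1).any
            (fun i => decide (rc.1 + i * dir.1 ≥ bs.1) || decide (rc.2 + i * dir.2 ≥ bs.2)) = true := by
          intro h
          rcases List.any_eq_true.mp h with ⟨i, hmem, hb⟩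
          rcases PySem.List.mem_pyRange_one.mp hmem with ⟨h0, hiL⟩
          apply hv
          refine ⟨i, ⟨h0, hiL⟩, ?_⟩
          simpa using hb
        rw [if_neg hany]
        rw [if_neg (fun h => hv ((endpoint_iff rc dir bs L hL).mpr h))]
        simp
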